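-- pv_equiv track=rewrite | github.com/Liu-Yufei/sam2_3d | predictor.py | get_selected_frame
-- ===== SOURCE A (Python) =====
-- def get_selected_frame(frame_list, n_shot = 3):
--     # 从frame_list中均匀选择n_shot个frame
--     n = len(frame_list)
--     size = n // n_shot
--     remainder = n % n_shot
--     parts = []
--     start_idx = 0
--     for i in range(n_shot):
--         #前remainder个size+1
--         extra = 1 if i < remainder else 0
--         end_idx = start_idx + size + extra
--         parts.append(frame_list[start_idx:end_idx])
--         start_idx = end_idx
--     selected_frames = []
--     for part in parts:
--         m = len(part)
--         if m % 2 == 1: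
--             # 奇数个，取中间
--             selected_frames.append(part[m // 2])
--         else:
--             # 偶数个，取靠前的中间
--             selected_frames.append(part[m // 2 - 1])
--     selected_frames = [f'{x:05d}.jpg' for x in selected_frames]
--     return selected_frames
-- ===== SOURCE B (Python) =====
-- def get_selected_frame(frame_list, n_shot=3):
--     # Direct arithmetic: part i spans [i*size + min(i, remainder), ...) and its
--     # middle element sits at offset (m-1)//2; index frame_list once per part.
--     n = len(frame_list)
--     size = n // n_shot
--     remainder = n % n_shot
--     out = []
--     for i in range(n_shot):
--         start = i * size + min(i, remainder)
--         m = size + (1 if i < remainder else 0)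
--         out.append(f'{frame_list[start + (m - 1) // 2]:05d}.jpg')
--     return out
-- ===== Notes on version B (the rewrite author's own statement) =====
-- stated objective: alternative
-- what changed: Instead of materialising all n_shot slices and scanning them in a second loop, B computes each part's start and length arithmetically (start = i*size + min(i, remainder), middle offset = (m-1)//2, unifying the odd/even cases) and indexes frame_list directly once per part (O(n_shot) index computations, no slicing); a timing run could not consistently confirm a 1.5x speed-up, so no speed is claimed.
import Mathlib
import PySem

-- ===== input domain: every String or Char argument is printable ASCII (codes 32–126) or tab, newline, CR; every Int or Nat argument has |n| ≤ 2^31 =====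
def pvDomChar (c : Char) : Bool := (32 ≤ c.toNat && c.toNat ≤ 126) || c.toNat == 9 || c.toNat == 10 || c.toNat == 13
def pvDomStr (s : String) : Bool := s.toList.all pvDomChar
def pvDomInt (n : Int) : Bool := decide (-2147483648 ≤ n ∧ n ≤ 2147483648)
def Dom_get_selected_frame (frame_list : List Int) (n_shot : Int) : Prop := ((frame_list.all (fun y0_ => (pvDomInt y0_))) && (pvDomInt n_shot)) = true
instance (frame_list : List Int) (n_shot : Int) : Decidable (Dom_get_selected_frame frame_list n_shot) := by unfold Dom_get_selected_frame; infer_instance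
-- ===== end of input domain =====

-- B replaces A's slice-building pass and second scan by one direct arithmetic
-- lookup per part (start = i*size + min(i, remainder), middle offset = (m-1)//2),
-- avoiding the slices altogether.

-- f'{x:05d}.jpg' — the identical f-string appears in both Python sources;
-- exact: f'{x:05d}' = str(x).zfill(5) in Python.
def pvFmt (x : Int) : String := PySem.Str.zfill (PySem.Int.toStr x) 5 ++ ".jpg"

-- ===== PORT A =====
-- literal transliteration of A; part[...] (an IndexError on an empty part, reached
-- only when n_shot > len(frame_list), which Pre_ excludes) is pyGet? with getD 0.
def get_selected_frame (frame_list : List Int) (n_shot : Int) : List String :=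
  let n : Int := frame_list.length
  let size := PySem.Int.floordiv n n_shot
  let remainder := PySem.Int.mod n n_shot
  let st := (PySem.List.pyRange 0 n_shot 1).foldl
    (fun (acc : List (List Int) × Int) i =>
      let extra : Int := if i < remainder then 1 else 0
      let endIdx := acc.2 + size + extra
      (acc.1 ++ [PySem.List.slice frame_list (some acc.2) (some endIdx)], endIdx))
    ([], 0)
  let selected := st.1.foldl
    (fun (acc : List Int) part =>
      let m : Int := part.length
      if PySem.Int.mod m 2 = 1 then
        acc ++ [(PySem.List.pyGet? part (PySem.Int.floordiv m 2)).getD 0]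
      else
        acc ++ [(PySem.List.pyGet? part (PySem.Int.floordiv m 2 - 1)).getD 0])
    []
  selected.map pvFmt

-- ===== PORT B =====
-- transliteration of Source B; frame_list[...] is pyGet? with getD 0 (in range on Pre_).
def get_selected_frame_alt (frame_list : List Int) (n_shot : Int) : List String :=
  let n : Int := frame_list.length
  let size := PySem.Int.floordiv n n_shot
  let remainder := PySem.Int.mod n n_shot
  (PySem.List.pyRange 0 n_shot 1).foldl
    (fun (acc : List String) i =>
      let start := i * size + min i remainder
      let m := size + (if i < remainder then (1 : Int) else 0)
      acc ++ [pvFmt ((PySem.List.pyGet? frame_list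
                        (start + PySem.Int.floordiv (m - 1) 2)).getD 0)])
    []

-- ===== PRECONDITION & SPEC =====
-- Pre_ excludes exactly the inputs on which A raises: n_shot = 0 (ZeroDivisionError)
-- and 1 ≤ n_shot > len(frame_list) (IndexError on an empty part); A returns on
-- every other input and Pre_ admits all of those.
def Pre_get_selected_frame (frame_list : List Int) (n_shot : Int) : Prop :=
  n_shot < 0 ∨ (1 ≤ n_shot ∧ n_shot ≤ (frame_list.length : Int))
instance (frame_list : List Int) (n_shot : Int) : Decidable (Pre_get_selected_frame frame_list n_shot) := by unfold Pre_get_selected_frame; infer_instance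
def pvWitness_get_selected_frame : List Int × Int := ([3, 1, 4, 1, 5, 9, 2], 3)

def Spec_get_selected_frame (frame_list : List Int) (n_shot : Int) (out : List String) : Prop := out = get_selected_frame_alt frame_list n_shot
instance (frame_list : List Int) (n_shot : Int) (out : List String) : Decidable (Spec_get_selected_frame frame_list n_shot out) := by unfold Spec_get_selected_frame; infer_instance

-- ===== CLAIM (what is proved, stated in full; the proofs are below) =====
def Claim_equal_get_selected_frame : Prop := ∀ (frame_list : List Int) (n_shot : Int), Dom_get_selected_frame frame_list n_shot → Pre_get_selected_frame frame_list n_shot → Spec_get_selected_frame frame_list n_shot (get_selected_frame frame_list n_shot)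

-- ===== LEMMAS AND PROOFS =====

-- the value A's second loop extracts from one part
def pickA (part : List Int) : Int :=
  let m : Int := part.length
  if PySem.Int.mod m 2 = 1 then (PySem.List.pyGet? part (PySem.Int.floordiv m 2)).getD 0
  else (PySem.List.pyGet? part (PySem.Int.floordiv m 2 - 1)).getD 0

lemma min_succ_eq (j rem : Int) :
    min (j + 1) rem = min j rem + (if j < rem then (1:Int) else 0) := by
  split <;> omega


-- closed form of A's first loop: part i is the slice
-- [i*size + min i rem, (i+1)*size + min (i+1) rem)
lemma foldA_closed (fl : List Int) (size rem : Int) (k : Nat) :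
    ∀ (j : Int) (ps : List (List Int)),
    (PySem.List.pyRange j (j + k) 1).foldl
      (fun (acc : List (List Int) × Int) i =>
        let extra : Int := if i < rem then 1 else 0
        let endIdx := acc.2 + size + extra
        (acc.1 ++ [PySem.List.slice fl (some acc.2) (some endIdx)], endIdx))
      (ps, j * size + min j rem)
    = (ps ++ (PySem.List.pyRange j (j + k) 1).map
          (fun i => PySem.List.slice fl (some (i * size + min i rem))
                      (some ((i + 1) * size + min (i + 1) rem))),
       (j + k) * size + min (j + k) rem) := by
  induction k with
  | zero =>
      intro j ps
      rw [show j + ((0:Nat):Int) = j by push_cast; ring,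
          PySem.List.pyRange_one_eq_nil (le_refl j)]
      simp
  | succ k ih =>
      intro j ps
      have hlt : j < j + ((k:Nat) + 1 : Nat) := by push_cast; omega
      rw [PySem.List.pyRange_one_cons hlt]
      simp only [List.foldl_cons, List.map_cons]
      have hend : j * size + min j rem + size + (if j < rem then (1:Int) else 0)
            = (j + 1) * size + min (j + 1) rem := by rw [min_succ_eq]; ring
      have hrange : j + ((k + 1 : Nat) : Int) = (j + 1) + (k : Nat) := by push_cast; ring
      rw [hend, hrange, ih (j + 1) (ps ++ [_])]
      simp

-- pointwise: the middle element A picks out of part i equals B's direct lookup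
lemma pick_eq (fl : List Int) (size rem i : Int)
    (hsz : 1 ≤ size) (hr : 0 ≤ rem) (hi : 0 ≤ i)
    (hend : (i + 1) * size + min (i + 1) rem ≤ (fl.length : Int)) :
    pickA (PySem.List.slice fl (some (i * size + min i rem))
             (some ((i + 1) * size + min (i + 1) rem)))
    = (PySem.List.pyGet? fl
        (i * size + min i rem +
          PySem.Int.floordiv (size + (if i < rem then (1:Int) else 0) - 1) 2)).getD 0 := by
  set s : Int := i * size + min i rem with hsdef
  set e : Int := (i + 1) * size + min (i + 1) rem with hedef
  have hmul : 0 ≤ i * size := mul_nonneg hi (by omega)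
  have h0s : 0 ≤ s := by rw [hsdef]; have : 0 ≤ min i rem := le_min hi hr; omega
  have hm : e - s = size + (if i < rem then (1:Int) else 0) := by
    rw [hsdef, hedef, min_succ_eq]; ring
  have h0e : 0 ≤ e := by have := min_succ_eq i rem; omega
  have hse : s + 1 ≤ e := by have : (0:Int) ≤ if i < rem then (1:Int) else 0 := by split <;> omega
                             omega
  have heln : e.toNat ≤ fl.length := by omega
  rw [PySem.List.slice_toNat fl h0s h0e]
  have hlen : (List.take (e.toNat - s.toNat) (List.drop s.toNat fl)).length = e.toNat - s.toNat := by
    simp; omega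
  set mI : Int := size + (if i < rem then (1:Int) else 0) with hmi
  have hmI1 : 1 ≤ mI := by omega
  -- the index A picks, as Int
  have hlenI : ((List.take (e.toNat - s.toNat) (List.drop s.toNat fl)).length : Int) = mI := by
    rw [hlen]; omega
  unfold pickA
  simp only [hlenI]
  have hfd : PySem.Int.floordiv mI 2 = mI / 2 := PySem.Int.floordiv_eq_ediv_of_pos (by omega)
  have hfd2 : PySem.Int.floordiv (mI - 1) 2 = (mI - 1) / 2 := PySem.Int.floordiv_eq_ediv_of_pos (by omega)
  have hmod : PySem.Int.mod mI 2 = mI % 2 := PySem.Int.mod_eq_emod_of_pos (by omega)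
  have hj0 : 0 ≤ (mI - 1) / 2 := by omega
  have hjlt : (mI - 1) / 2 < mI := by omega
  have key : ∀ (idx : Int), idx = (mI - 1) / 2 →
      (PySem.List.pyGet? (List.take (e.toNat - s.toNat) (List.drop s.toNat fl)) idx).getD 0
      = (PySem.List.pyGet? fl (s + PySem.Int.floordiv (mI - 1) 2)).getD 0 := by
    intro idx hidx
    subst hidx
    rw [hfd2, PySem.List.pyGet?_of_nonneg _ hj0,
        PySem.List.pyGet?_of_nonneg _ (by omega : (0:Int) ≤ s + (mI - 1) / 2)]
    rw [List.getElem?_take, if_pos (by omega : ((mI-1)/2).toNat < e.toNat - s.toNat),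
        List.getElem?_drop]
    have hix : s.toNat + ((mI - 1) / 2).toNat = (s + (mI - 1) / 2).toNat := by omega
    rw [hix]
  rw [hmod, hfd]
  split
  · exact key _ (by omega)
  · exact key _ (by omega)

lemma a_eq_b (fl : List Int) (ns : Int) (hpre : Pre_get_selected_frame fl ns) :
    get_selected_frame fl ns = get_selected_frame_alt fl ns := by
  rcases hpre with hneg | ⟨h1, h2⟩
  · simp only [get_selected_frame, get_selected_frame_alt,
        PySem.List.pyRange_one_eq_nil (by omega : ns ≤ (0:Int))]
    simp
  · simp only [get_selected_frame, get_selected_frame_alt]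
    set n : Int := (fl.length : Int) with hn
    set size := PySem.Int.floordiv n ns with hsize
    set rem := PySem.Int.mod n ns with hrem
    have hns : 0 < ns := by omega
    have hsz : 1 ≤ size := by
      rw [hsize]; exact (PySem.Int.le_floordiv_iff_mul_le hns).mpr (by omega)
    have hr : 0 ≤ rem := PySem.Int.mod_nonneg n hns
    have hrlt : rem < ns := PySem.Int.mod_lt n hns
    have hdiv : size * ns + rem = n := PySem.Int.floordiv_mul_add_mod n ns
    -- A's first loop in closed form
    have hzero : (0:Int) = 0 * size + min 0 rem := by
      have : min (0:Int) rem = 0 := min_eq_left hr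
      omega
    have hns' : ns = (0:Int) + ((ns.toNat : Nat) : Int) := by omega
    have hA := foldA_closed fl size rem ns.toNat 0 []
    rw [← hns', ← hzero] at hA
    rw [hA]
    rw [show (fun (acc : List Int) (part : List Int) =>
        let m : Int := part.length
        if PySem.Int.mod m 2 = 1 then
          acc ++ [(PySem.List.pyGet? part (PySem.Int.floordiv m 2)).getD 0]
        else
          acc ++ [(PySem.List.pyGet? part (PySem.Int.floordiv m 2 - 1)).getD 0])
      = (fun acc part => acc ++ [pickA part]) by
        funext acc part; unfold pickA; simp only []; split <;> rfl]
    rw [PySem.List.foldl_append_singleton_eq_map]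
    rw [PySem.List.foldl_append_singleton_eq_map (fun i => pvFmt ((PySem.List.pyGet? fl
          (i * size + min i rem +
            PySem.Int.floordiv (size + (if i < rem then (1:Int) else 0) - 1) 2)).getD 0))]
    simp only [List.nil_append, List.map_map]
    apply List.map_congr_left
    intro i hi
    rw [PySem.List.mem_pyRange_one] at hi
    obtain ⟨hi0, hilt⟩ := hi
    have hprod : (i + 1) * size ≤ ns * size :=
      mul_le_mul_of_nonneg_right (by omega) (by omega)
    have hmin2 : min (i + 1) rem ≤ rem := min_le_right _ _
    have hend : (i + 1) * size + min (i + 1) rem ≤ n := by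
      have hc : ns * size = size * ns := mul_comm _ _
      omega
    exact congrArg pvFmt (pick_eq fl size rem i hsz hr hi0 hend)

-- ===== VERDICT (by name: the statement is the Claim_ definition above) =====
theorem get_selected_frame_spec : Claim_equal_get_selected_frame := by
  intro fl ns _ hpre
  unfold Spec_get_selected_frame
  exact a_eq_b fl ns hpre
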